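-- pv_equiv track=rewrite | github.com/tushar-jaiswal/CSProblems | Problems/Beat Notations/BeatNotations.py | beats_to_durations
-- ===== SOURCE A (Python) =====
-- def beats_to_durations(beats):
--     durations = []
--     i = 0
--     n = len(beats)
--     while i < n:
--         if beats[i] == '1':
--             duration = 1
--             j = i + 1
--             while j < n and beats[j] == '0':
--                 duration += 1
--                 j += 1
--             durations.append((i, duration))
--             i = j
--         else:
--             i += 1
--     return durations  # List of (start_beat_index, duration)
-- ===== SOURCE B (Python) =====
-- def beats_to_durations(beats):
--     durations = []
--     active = False
--     for i, c in enumerate(beats):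
--         if c == '1':
--             durations.append((i, 1))
--             active = True
--         elif c == '0' and active:
--             s, d = durations[-1]
--             durations[-1] = (s, d + 1)
--         else:
--             active = False
--     return durations  # List of (start_beat_index, duration)
-- ===== Notes on version B (the rewrite author's own statement) =====
-- stated objective: simpler
-- what changed: Replaced the nested index-advancing while loops (outer scan plus inner run-consuming loop) by a single for-loop state machine over enumerate(beats) that keeps an 'active' flag and extends the last emitted pair in place on each '0'.
import Mathlib
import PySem

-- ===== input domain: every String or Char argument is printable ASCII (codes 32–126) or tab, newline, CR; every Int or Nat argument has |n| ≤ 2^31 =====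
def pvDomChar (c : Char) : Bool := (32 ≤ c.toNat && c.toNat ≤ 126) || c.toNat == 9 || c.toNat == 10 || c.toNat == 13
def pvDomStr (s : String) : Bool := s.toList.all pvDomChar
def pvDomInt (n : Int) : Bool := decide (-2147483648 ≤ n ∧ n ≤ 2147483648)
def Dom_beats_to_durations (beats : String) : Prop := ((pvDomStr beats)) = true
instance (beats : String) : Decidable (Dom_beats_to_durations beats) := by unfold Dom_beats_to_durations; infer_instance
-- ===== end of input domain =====

-- B replaces A's nested index-advancing while loops by one for-loop state machine with an
-- 'active' flag that extends the last emitted pair on each '0' (objective: simpler).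

-- ===== PORT A =====
-- inner while loop: 'while j < n and beats[j] == '0': duration += 1; j += 1'
-- (fuel only makes the loop structurally total; fuel = n always suffices since j increases)
def pvInnerA (s : List Char) (n : Nat) : Nat → Nat → Int → Nat × Int
  | 0, j, d => (j, d)
  | fuel+1, j, d =>
      if j < n ∧ s[j]? = some '0' then pvInnerA s n fuel (j+1) (d+1) else (j, d)

-- outer while loop of A (fuel = n suffices: i strictly increases each iteration)
def pvOuterA (s : List Char) (n : Nat) : Nat → Nat → List (Int × Int) → List (Int × Int)
  | 0, _, acc => acc
  | fuel+1, i, acc =>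
      if i < n then
        if s[i]? = some '1' then
          let p := pvInnerA s n n (i+1) 1
          pvOuterA s n fuel p.1 (acc ++ [((i : Int), p.2)])
        else pvOuterA s n fuel (i+1) acc
      else acc

def beats_to_durations (beats : String) : List (Int × Int) :=
  pvOuterA beats.toList beats.toList.length beats.toList.length 0 []

-- ===== PORT B =====
-- one step of B's for-loop body: state = (durations, active), input = (i, c)
def pvStepB (st : List (Int × Int) × Bool) (p : Int × Char) : List (Int × Int) × Bool :=
  if p.2 = '1' then (st.1 ++ [(p.1, 1)], true)
  else if p.2 = '0' ∧ st.2 = true then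
    -- durations[-1] = (s, d+1); the none case is unreachable (active implies nonempty)
    match st.1.getLast? with
    | some (a, d) => (st.1.dropLast ++ [(a, d + 1)], true)
    | none => (st.1, true)
  else (st.1, false)

def beats_to_durations_alt (beats : String) : List (Int × Int) :=
  ((PySem.List.enumerate beats.toList 0).foldl pvStepB ([], false)).1

-- ===== PRECONDITION & SPEC =====
def Spec_beats_to_durations (beats : String) (out : List (Int × Int)) : Prop := out = beats_to_durations_alt beats
instance (beats : String) (out : List (Int × Int)) : Decidable (Spec_beats_to_durations beats out) := by unfold Spec_beats_to_durations; infer_instance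

-- ===== CLAIM (what is proved, stated in full; the proofs are below) =====
def Claim_equal_beats_to_durations : Prop := ∀ (beats : String), Dom_beats_to_durations beats → Spec_beats_to_durations beats (beats_to_durations beats)

-- ===== LEMMAS AND PROOFS =====

theorem pvInnerA_ge (s : List Char) (n : Nat) :
    ∀ (fuel j : Nat) (d : Int), j ≤ (pvInnerA s n fuel j d).1 := by
  intro fuel
  induction fuel with
  | zero => intro j d; simp [pvInnerA]
  | succ fuel ih =>
      intro j d
      rw [pvInnerA]
      split
      · exact le_trans (by omega) (ih (j+1) (d+1))
      · simp

theorem pvInnerA_le (s : List Char) (n : Nat) :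
    ∀ (fuel j : Nat) (d : Int), j ≤ n → (pvInnerA s n fuel j d).1 ≤ n := by
  intro fuel
  induction fuel with
  | zero => intro j d hj; simpa [pvInnerA]
  | succ fuel ih =>
      intro j d hj
      rw [pvInnerA]
      split
      · exact ih (j+1) (d+1) (by omega)
      · simpa

theorem pvInnerA_stop (s : List Char) (n : Nat) :
    ∀ (fuel j : Nat) (d : Int), j ≤ n → n - j ≤ fuel →
      (pvInnerA s n fuel j d).1 < n → ¬ s[(pvInnerA s n fuel j d).1]? = some '0' := by
  intro fuel
  induction fuel with
  | zero =>
      intro j d hj hf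
      have : j = n := by omega
      simp [pvInnerA, this]
  | succ fuel ih =>
      intro j d hj hf
      rw [pvInnerA]
      split
      · exact ih (j+1) (d+1) (by omega) (by omega)
      · intro hlt
        rename_i h
        simp only [not_and] at h
        exact h hlt

-- B's fold absorbs a run of zeros exactly as A's inner loop counts it
theorem pvInner_fold (s : List Char) (n : Nat) (hn : n = s.length) :
    ∀ (fuel j : Nat) (d : Int) (acc : List (Int × Int)) (a : Int), j ≤ n → n - j ≤ fuel →
    List.foldl pvStepB (acc ++ [(a, d)], true) (PySem.List.enumerate (s.drop j) j)
      = List.foldl pvStepB (acc ++ [(a, (pvInnerA s n fuel j d).2)], true)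
          (PySem.List.enumerate (s.drop (pvInnerA s n fuel j d).1) ((pvInnerA s n fuel j d).1)) := by
  intro fuel
  induction fuel with
  | zero =>
      intro j d acc a hj hf
      simp [pvInnerA]
  | succ fuel ih =>
      intro j d acc a hj hf
      rw [pvInnerA]
      split
      · rename_i h
        obtain ⟨hjn, hc⟩ := h
        have hjl : j < s.length := by omega
        have hcons : s.drop j = s[j] :: s.drop (j+1) := List.drop_eq_getElem_cons hjl
        have hcj : s[j] = '0' := by
          rw [List.getElem?_eq_getElem hjl] at hc; simpa using hc
        rw [hcons, PySem.List.enumerate_cons]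
        have hstep : pvStepB (acc ++ [(a, d)], true) ((j : Int), s[j])
            = (acc ++ [(a, d + 1)], true) := by
          simp [pvStepB, hcj]
        rw [List.foldl_cons, hstep]
        have hcast : ((j : Int) + 1) = ((j + 1 : Nat) : Int) := by push_cast; ring
        rw [hcast]
        exact ih (j+1) (d+1) acc a (by omega) (by omega)
      · rfl

-- main invariant: A's outer loop from position i equals B's fold over the enumerated suffix,
-- provided that when 'active' is set the current char is not '0' (A's inner loop just ended there)
theorem pvMain (s : List Char) (n : Nat) (hn : n = s.length) :
    ∀ (fuel i : Nat) (acc : List (Int × Int)) (b : Bool), i ≤ n → n - i ≤ fuel →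
      (b = true → ¬ s[i]? = some '0') →
      pvOuterA s n fuel i acc
        = (List.foldl pvStepB (acc, b) (PySem.List.enumerate (s.drop i) i)).1 := by
  intro fuel
  induction fuel with
  | zero =>
      intro i acc b hi hf _
      have : s.drop i = [] := List.drop_eq_nil_of_le (by omega)
      simp [pvOuterA, this]
  | succ fuel ih =>
      intro i acc b hi hf hb
      rw [pvOuterA]
      by_cases h : i < n
      · have hil : i < s.length := by omega
        have hcons : s.drop i = s[i] :: s.drop (i+1) := List.drop_eq_getElem_cons hil
        by_cases h1 : s[i]? = some '1'
        · -- s[i] = '1'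
          have hci : s[i] = '1' := by
            rw [List.getElem?_eq_getElem hil] at h1; simpa using h1
          rw [hcons, PySem.List.enumerate_cons]
          have hstep : pvStepB (acc, b) ((i : Int), s[i]) = (acc ++ [((i : Int), 1)], true) := by
            simp [pvStepB, hci]
          rw [List.foldl_cons, hstep]
          have hcast : ((i : Int) + 1) = ((i + 1 : Nat) : Int) := by push_cast; ring
          rw [hcast, pvInner_fold s n hn n (i+1) 1 acc (i : Int) (by omega) (by omega)]
          have hge := pvInnerA_ge s n n (i+1) 1
          have hle := pvInnerA_le s n n (i+1) 1 (by omega)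
          simp only [if_pos h, if_pos h1]
          refine ih (pvInnerA s n n (i+1) 1).1 (acc ++ [((i : Int), (pvInnerA s n n (i+1) 1).2)])
            true hle (by omega) (fun _ => ?_)
          by_cases hpn : (pvInnerA s n n (i+1) 1).1 < n
          · exact pvInnerA_stop s n n (i+1) 1 (by omega) (by omega) hpn
          · rw [List.getElem?_eq_none (by omega)]; simp
        · -- s[i] ≠ '1'
          have hci : ¬ s[i] = '1' := by
            intro hc
            exact h1 (by rw [List.getElem?_eq_getElem hil, hc])
          rw [hcons, PySem.List.enumerate_cons]
          have hstep : pvStepB (acc, b) ((i : Int), s[i]) = (acc, false) := by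
            cases hb0 : b with
            | false => simp [pvStepB, hci]
            | true =>
                have hci0 : ¬ s[i] = '0' := by
                  intro hc
                  exact hb hb0 (by rw [List.getElem?_eq_getElem hil, hc])
                simp [pvStepB, hci, hci0]
          rw [List.foldl_cons, hstep]
          have hcast : ((i : Int) + 1) = ((i + 1 : Nat) : Int) := by push_cast; ring
          rw [hcast]
          simp only [if_pos h, if_neg h1]
          exact ih (i+1) acc false (by omega) (by omega) (by simp)
      · have : s.drop i = [] := List.drop_eq_nil_of_le (by omega)
        simp [h, this]

-- ===== VERDICT (by name: the statement is the Claim_ definition above) =====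
theorem beats_to_durations_spec : Claim_equal_beats_to_durations := by
  intro beats _
  unfold Spec_beats_to_durations beats_to_durations beats_to_durations_alt
  simpa using pvMain beats.toList beats.toList.length rfl beats.toList.length 0 [] false
    (by omega) (by omega) (by simp)
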